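-- pv_equiv track=rewrite | github.com/GZYZhy/grade-analyze | app.py | pick_index
-- ===== SOURCE A (Python) =====
-- from typing import Dict, List, Optional, Tuple, Sequence
--
-- def pick_index(options: List[str], preferred: str, fallback: int = 0) -> int:
--     try:
--         return options.index(preferred)
--     except ValueError:
--         pass
--     normalized = [o.replace(" ", "") for o in options]
--     preferred_norm = preferred.replace(" ", "")
--     try:
--         return normalized.index(preferred_norm)
--     except ValueError:
--         return fallback
-- ===== SOURCE B (Python) =====
-- def pick_index(options, preferred, fallback=0):
--     preferred_norm = preferred.replace(" ", "")
--     exact = None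
--     norm = None
--     for i, o in enumerate(options):
--         if exact is None and o == preferred:
--             exact = i
--         if norm is None and o.replace(" ", "") == preferred_norm:
--             norm = i
--     if exact is not None:
--         return exact
--     if norm is not None:
--         return norm
--     return fallback
-- ===== Notes on version B (the rewrite author's own statement) =====
-- stated objective: simpler
-- what changed: Replaces two list.index scans plus a built normalized copy of the list with one pass over enumerate(options) that records the first exact and first normalized match indices, returning exact, else normalized, else fallback.
import Mathlib
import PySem

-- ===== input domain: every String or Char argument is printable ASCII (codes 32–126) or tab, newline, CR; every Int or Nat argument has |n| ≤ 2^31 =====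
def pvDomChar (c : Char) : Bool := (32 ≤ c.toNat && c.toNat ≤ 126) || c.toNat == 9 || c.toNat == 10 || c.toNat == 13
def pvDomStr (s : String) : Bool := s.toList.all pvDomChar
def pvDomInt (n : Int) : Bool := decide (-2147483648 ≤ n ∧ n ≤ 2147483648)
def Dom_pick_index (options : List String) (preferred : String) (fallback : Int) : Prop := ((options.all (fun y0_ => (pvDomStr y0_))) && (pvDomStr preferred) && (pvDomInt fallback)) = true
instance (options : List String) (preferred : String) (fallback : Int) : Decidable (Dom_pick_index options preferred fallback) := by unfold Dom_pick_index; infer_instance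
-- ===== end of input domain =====

-- B replaces A's two list.index scans over options and a built normalized copy with one
-- pass over enumerate(options) keeping the first exact and first normalized match indices (simpler).

-- ===== PORT A =====
def pick_index (options : List String) (preferred : String) (fallback : Int) : Int :=
  match PySem.List.index? options preferred with
  | some i => (i : Int)
  | none =>
    let normalized := options.map (fun o => PySem.Str.replace o " " "")
    let preferred_norm := PySem.Str.replace preferred " " ""
    match PySem.List.index? normalized preferred_norm with
    | some i => (i : Int)
    | none => fallback

-- ===== PORT B =====
def pick_index_alt (options : List String) (preferred : String) (fallback : Int) : Int :=
  let preferred_norm := PySem.Str.replace preferred " " ""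
  let st := (PySem.List.enumerate options 0).foldl
    (fun (st : Option Int × Option Int) (p : Int × String) =>
      let st1 := if st.1 = none ∧ p.2 = preferred then (some p.1, st.2) else st
      if st1.2 = none ∧ PySem.Str.replace p.2 " " "" = preferred_norm then (st1.1, some p.1) else st1)
    (none, none)
  match st.1 with
  | some i => i
  | none =>
    match st.2 with
    | some i => i
    | none => fallback

-- ===== PRECONDITION & SPEC =====
def Spec_pick_index (options : List String) (preferred : String) (fallback : Int) (out : Int) : Prop := out = pick_index_alt options preferred fallback
instance (options : List String) (preferred : String) (fallback : Int) (out : Int) : Decidable (Spec_pick_index options preferred fallback out) := by unfold Spec_pick_index; infer_instance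

-- ===== CLAIM (what is proved, stated in full; the proofs are below) =====
def Claim_equal_pick_index : Prop := ∀ (options : List String) (preferred : String) (fallback : Int), Dom_pick_index options preferred fallback → Spec_pick_index options preferred fallback (pick_index options preferred fallback)

-- ===== LEMMAS AND PROOFS =====

theorem idxOf?_bind_self {α : Type} [BEq α] [LawfulBEq α] (v : α) (l : List α) (s : Int) :
    some s = (List.idxOf? v (v :: l)).bind fun a => some (s + (a : Int)) := by
  simp [List.idxOf?_cons]

theorem idxOf?_bind_shift {α : Type} [BEq α] [LawfulBEq α] (v x : α) (l : List α) (s : Int) (hx : ¬ x = v) :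
    ((List.idxOf? v l).bind fun a => some (s + 1 + (a : Int))) = (List.idxOf? v (x :: l)).bind fun a => some (s + (a : Int)) := by
  simp only [List.idxOf?_cons]
  have : (x == v) = false := by simp [hx]
  rw [this]
  cases h : List.idxOf? v l <;> simp <;> omega

-- B's single pass characterised: each component is the corresponding first-match index, shifted by the start offset.
theorem pick_loop_eq (preferred pn : String) (l : List String) (s : Int) (acc : Option Int × Option Int) :
    (PySem.List.enumerate l s).foldl
      (fun (st : Option Int × Option Int) (p : Int × String) =>
        let st1 := if st.1 = none ∧ p.2 = preferred then (some p.1, st.2) else st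
        if st1.2 = none ∧ PySem.Str.replace p.2 " " "" = pn then (st1.1, some p.1) else st1)
      acc
    = (acc.1.orElse (fun _ => (PySem.List.index? l preferred).map (fun k => s + (k : Int))),
       acc.2.orElse (fun _ => (PySem.List.index? (l.map (fun o => PySem.Str.replace o " " "")) pn).map (fun k => s + (k : Int)))) := by
  induction l generalizing s acc with
  | nil => simp [PySem.List.enumerate, PySem.List.index?]
  | cons x xs ih =>
    rw [PySem.List.enumerate_cons, List.foldl_cons, ih]
    obtain ⟨a1, a2⟩ := acc
    by_cases hx : x = preferred <;> by_cases hn : PySem.Str.replace x " " "" = pn <;>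
      cases a1 <;> cases a2 <;>
      simp_all [Option.orElse] <;>
      try (first
        | exact ⟨idxOf?_bind_self _ _ _, idxOf?_bind_self _ _ _⟩
        | exact ⟨idxOf?_bind_self _ _ _, idxOf?_bind_shift _ _ _ _ hn⟩
        | exact ⟨idxOf?_bind_shift _ _ _ _ hx, idxOf?_bind_self _ _ _⟩
        | exact ⟨idxOf?_bind_shift _ _ _ _ hx, idxOf?_bind_shift _ _ _ _ hn⟩
        | exact idxOf?_bind_self _ _ _
        | exact idxOf?_bind_shift _ _ _ _ hx
        | exact idxOf?_bind_shift _ _ _ _ hn)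

-- ===== VERDICT (by name: the statement is the Claim_ definition above) =====
theorem pick_index_spec : Claim_equal_pick_index := by
  intro options preferred fallback _
  unfold Spec_pick_index pick_index pick_index_alt
  simp only [pick_loop_eq]
  cases h1 : PySem.List.index? options preferred <;>
    cases h2 : PySem.List.index? (options.map (fun o => PySem.Str.replace o " " "")) (PySem.Str.replace preferred " " "") <;>
    simp_all [Option.orElse]
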